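-- pv_equiv track=rewrite | github.com/wawzysys/Algorithm | bishi/京东8.24/1.py | find_longest_triangle_interval
-- ===== SOURCE A (Python) =====
-- def find_longest_triangle_interval(stick_lengths):
--     n = len(stick_lengths)
--     left, right = 0, 2
--     max_len = 0
--     start_pos = 0
--     while left < n - 2:
--         while right < n and can_form_triangle(stick_lengths[left:right + 1]):
--             right += 1
--
--         if right - left > max_len:
--             max_len = right - left
--             start_pos = left
--
--         left += 1
--         right = left + 2
--     return [start_pos, start_pos + max_len - 1]
--
-- def can_form_triangle(arr):
--     for i in range(len(arr) - 2):
--         if arr[i] + arr[i + 1] <= arr[i + 2]: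
--             return False
--     return True
-- ===== SOURCE B (Python) =====
-- def find_longest_triangle_interval(stick_lengths):
--     # One backward pass: `run` counts consecutive valid triples starting at i;
--     # >= keeps the earliest start on ties, matching A's earliest-window choice.
--     n = len(stick_lengths)
--     max_len, start, run = 0, 0, 0
--     i = n - 3
--     while i >= 0:
--         if stick_lengths[i] + stick_lengths[i + 1] > stick_lengths[i + 2]:
--             run += 1
--         else:
--             run = 0
--         if run + 2 >= max_len:
--             max_len, start = run + 2, i
--         i -= 1
--     return [start, start + max_len - 1]
-- ===== Notes on version B (the rewrite author's own statement) =====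
-- stated objective: faster
-- what changed: A rescans a growing slice with nested while-loops for every left endpoint; B makes one backward pass maintaining the count of consecutive valid triples (run) and the best window so far, so slicing and both inner scans disappear.
import Mathlib
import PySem

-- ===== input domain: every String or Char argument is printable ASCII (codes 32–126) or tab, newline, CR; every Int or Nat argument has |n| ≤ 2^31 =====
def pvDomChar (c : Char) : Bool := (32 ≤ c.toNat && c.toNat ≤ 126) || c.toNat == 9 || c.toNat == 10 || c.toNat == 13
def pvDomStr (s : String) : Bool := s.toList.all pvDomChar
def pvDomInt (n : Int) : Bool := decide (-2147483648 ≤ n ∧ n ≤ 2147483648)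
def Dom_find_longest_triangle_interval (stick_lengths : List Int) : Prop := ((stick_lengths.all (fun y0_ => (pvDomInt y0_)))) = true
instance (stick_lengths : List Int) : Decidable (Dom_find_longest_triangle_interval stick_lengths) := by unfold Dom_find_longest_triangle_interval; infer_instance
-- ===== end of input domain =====

-- B replaces A's nested rescans of growing slices by one backward pass that keeps a
-- running count of consecutive valid triples (objective: faster; measured).

-- ===== PORT A =====
-- can_form_triangle(arr): scan of consecutive triples (early exit = List.all short-circuit)
def pvCanTri (arr : List Int) : Bool :=
  (List.range (arr.length - 2)).all fun i =>
    !(decide (arr.getD i 0 + arr.getD (i + 1) 0 ≤ arr.getD (i + 2) 0))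

-- inner `while right < n and can_form_triangle(stick_lengths[left:right+1])`
def pvInner (s : List Int) (n left right : Nat) : Nat :=
  if h : right < n ∧ pvCanTri (PySem.List.slice s (some (left : Int)) (some ((right : Int) + 1))) = true then
    pvInner s n left (right + 1)
  else right
termination_by n - right
decreasing_by omega

-- outer `while left < n - 2` loop carrying (max_len, start_pos)
def pvOuter (s : List Int) (n left maxLen startPos : Nat) : Nat × Nat :=
  if h : left < n - 2 then
    let right := pvInner s n left (left + 2)
    if right - left > maxLen then pvOuter s n (left + 1) (right - left) left
    else pvOuter s n (left + 1) maxLen startPos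
  else (maxLen, startPos)
termination_by n - 2 - left
decreasing_by all_goals omega

def find_longest_triangle_interval (stick_lengths : List Int) : List Int :=
  let n := stick_lengths.length
  let r := pvOuter stick_lengths n 0 0 0
  [(r.2 : Int), (r.2 : Int) + (r.1 : Int) - 1]

-- ===== PORT B =====
-- `while i >= 0` backward loop of Source B with state (max_len, start, run); i stays ≥ 0
-- inside the loop, so indexing via i.toNat is exact
def pvBLoop (s : List Int) (i : Int) (maxLen start run : Nat) : Nat × Nat :=
  if h : 0 ≤ i then
    let run' := if s.getD i.toNat 0 + s.getD (i.toNat + 1) 0 > s.getD (i.toNat + 2) 0 then run + 1 else 0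
    if run' + 2 ≥ maxLen then pvBLoop s (i - 1) (run' + 2) i.toNat run'
    else pvBLoop s (i - 1) maxLen start run'
  else (maxLen, start)
termination_by (i + 1).toNat
decreasing_by all_goals omega

def find_longest_triangle_interval_alt (stick_lengths : List Int) : List Int :=
  let n := stick_lengths.length
  let r := pvBLoop stick_lengths ((n : Int) - 3) 0 0 0
  [(r.2 : Int), (r.2 : Int) + (r.1 : Int) - 1]

-- ===== PRECONDITION & SPEC =====
def Spec_find_longest_triangle_interval (stick_lengths : List Int) (out : List Int) : Prop := out = find_longest_triangle_interval_alt stick_lengths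
instance (stick_lengths : List Int) (out : List Int) : Decidable (Spec_find_longest_triangle_interval stick_lengths out) := by unfold Spec_find_longest_triangle_interval; infer_instance

-- ===== CLAIM (what is proved, stated in full; the proofs are below) =====
def Claim_equal_find_longest_triangle_interval : Prop := ∀ (stick_lengths : List Int), Dom_find_longest_triangle_interval stick_lengths → Spec_find_longest_triangle_interval stick_lengths (find_longest_triangle_interval stick_lengths)

-- ===== LEMMAS AND PROOFS =====

-- good s j: the triple at positions (j, j+1, j+2) satisfies the triangle condition
def pvGoodB (s : List Int) (j : Nat) : Bool := decide (s.getD j 0 + s.getD (j + 1) 0 > s.getD (j + 2) 0)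

-- streak s j: number of consecutive good triples starting at j (capped by the list end)
def pvStreak (s : List Int) (j : Nat) : Nat :=
  if h : j + 2 < s.length ∧ pvGoodB s j = true then pvStreak s (j + 1) + 1 else 0
termination_by s.length - j
decreasing_by omega

-- pvBestUp s L = (max over i < L of streak i + 2, least argmax), (0,0) for L = 0
def pvBestUp (s : List Int) : Nat → Nat × Nat
  | 0 => (0, 0)
  | L + 1 =>
    let c := pvStreak s L + 2
    let m := pvBestUp s L
    if c > m.1 then (c, L) else m

-- can_form_triangle on the slice [L..R] reduces to the newest triple, given all earlier ones hold
lemma pvCanTri_slice (s : List Int) (L R : Nat) (hLR : L + 2 ≤ R) (hR : R < s.length)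
    (hinv : ∀ j, L ≤ j → j + 3 ≤ R → pvGoodB s j = true) :
    pvCanTri (PySem.List.slice s (some (L : Int)) (some ((R : Int) + 1))) = pvGoodB s (R - 2) := by
  have hcast : ((R : Int) + 1) = ((R + 1 : Nat) : Int) := by push_cast; ring
  rw [hcast, PySem.List.slice_natCast]
  set arr := (s.drop L).take (R + 1 - L) with harr
  have hlen : arr.length = R + 1 - L := by
    simp [harr]; omega
  have hget : ∀ k, k < R + 1 - L → arr.getD k 0 = s.getD (L + k) 0 := by
    intro k hk
    simp [harr, List.getD_eq_getElem?_getD, hk, List.getElem?_drop]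
  have hidx : ∀ i, i < R - 1 - L →
      (!(decide (arr.getD i 0 + arr.getD (i + 1) 0 ≤ arr.getD (i + 2) 0)))
        = pvGoodB s (L + i) := by
    intro i hi
    rw [hget i (by omega), hget (i+1) (by omega), hget (i+2) (by omega)]
    have e1 : L + (i + 1) = (L + i) + 1 := by omega
    have e2 : L + (i + 2) = (L + i) + 2 := by omega
    rw [e1, e2, pvGoodB]
    simp [← decide_not]
  rw [pvCanTri, hlen]
  have h2 : R + 1 - L - 2 = R - 1 - L := by omega
  rw [h2]
  cases hgood : pvGoodB s (R - 2) with
  | false =>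
    apply List.all_eq_false.mpr
    refine ⟨R - 2 - L, List.mem_range.mpr (by omega), ?_⟩
    rw [hidx _ (by omega)]
    have : L + (R - 2 - L) = R - 2 := by omega
    rw [this, hgood]; simp
  | true =>
    apply List.all_eq_true.mpr
    intro i hi
    have hi' := List.mem_range.mp hi
    rw [hidx _ hi']
    by_cases hc : L + i = R - 2
    · rw [hc]; exact hgood
    · exact hinv (L + i) (by omega) (by omega)

-- A's inner while loop extends the window by exactly the remaining streak
lemma pvInner_eq (s : List Int) (L : Nat) : ∀ k R, s.length - R = k → L + 2 ≤ R → R ≤ s.length →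
    (∀ j, L ≤ j → j + 3 ≤ R → pvGoodB s j = true) →
    pvInner s s.length L R = R + pvStreak s (R - 2) := by
  intro k
  induction k with
  | zero =>
    intro R hk hLR hRn hinv
    have hR : R = s.length := by omega
    rw [pvInner, pvStreak]
    have h1 : ¬ (R < s.length ∧ pvCanTri (PySem.List.slice s (some (L : Int)) (some ((R : Int) + 1))) = true) := by
      intro ⟨h, _⟩; omega
    have h2 : ¬ (R - 2 + 2 < s.length ∧ pvGoodB s (R - 2) = true) := by
      intro ⟨h, _⟩; omega
    rw [dif_neg h1, dif_neg h2]; omega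
  | succ k ih =>
    intro R hk hLR hRn hinv
    have hR : R < s.length := by omega
    rw [pvInner, pvStreak]
    have hslice := pvCanTri_slice s L R hLR hR hinv
    have hR2 : R - 2 + 2 = R := by omega
    by_cases hg : pvGoodB s (R - 2) = true
    · have hcond : R < s.length ∧ pvCanTri (PySem.List.slice s (some (L : Int)) (some ((R : Int) + 1))) = true :=
        ⟨hR, by rw [hslice]; exact hg⟩
      rw [dif_pos hcond, dif_pos ⟨by omega, hg⟩]
      have hrec := ih (R + 1) (by omega) (by omega) (by omega)
        (by intro j hj hj3; by_cases hc : j = R - 2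
            · rw [hc]; exact hg
            · exact hinv j hj (by omega))
      rw [hrec]
      have : R + 1 - 2 = R - 2 + 1 := by omega
      rw [this]; omega
    · have hcond : ¬ (R < s.length ∧ pvCanTri (PySem.List.slice s (some (L : Int)) (some ((R : Int) + 1))) = true) := by
        intro ⟨_, hc⟩; rw [hslice] at hc; exact hg hc
      rw [dif_neg hcond, dif_neg (by intro ⟨_, h⟩; exact hg h)]; omega

-- A's outer loop, started at L with the running best over [0, L), lands at pvBestUp (n-2)
lemma pvOuter_eq (s : List Int) : ∀ k L, s.length - 2 - L = k → L ≤ s.length - 2 →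
    pvOuter s s.length L (pvBestUp s L).1 (pvBestUp s L).2 = pvBestUp s (s.length - 2) := by
  intro k
  induction k with
  | zero =>
    intro L hk hL
    have : L = s.length - 2 := by omega
    subst this
    rw [pvOuter, dif_neg (by omega)]
  | succ k ih =>
    intro L hk hL
    have hLn : L < s.length - 2 := by omega
    rw [pvOuter, dif_pos hLn]
    have hinner : pvInner s s.length L (L + 2) = (L + 2) + pvStreak s L := by
      have := pvInner_eq s L (s.length - (L + 2)) (L + 2) rfl (by omega) (by omega)
        (by intro j hj hj3; omega)
      simpa using this
    simp only [hinner]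
    have hsub : L + 2 + pvStreak s L - L = pvStreak s L + 2 := by omega
    simp only [hsub]
    have hstep : (if pvStreak s L + 2 > (pvBestUp s L).1 then
          pvOuter s s.length (L + 1) (pvStreak s L + 2) L
        else pvOuter s s.length (L + 1) (pvBestUp s L).1 (pvBestUp s L).2)
        = pvOuter s s.length (L + 1) (pvBestUp s (L + 1)).1 (pvBestUp s (L + 1)).2 := by
      rw [pvBestUp]
      by_cases hc : pvStreak s L + 2 > (pvBestUp s L).1
      · rw [if_pos hc, if_pos hc]
      · rw [if_neg hc, if_neg hc]
    rw [hstep]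
    exact ih (L + 1) (by omega) (by omega)

-- B's backward loop, about to process index L-1 with run = streak L, merges the best
-- over [0, L) into the incoming best with ties going to the smaller index
lemma pvBLoop_eq' (s : List Int) : ∀ L maxLen start, L + 2 ≤ s.length →
    pvBLoop s ((L : Int) - 1) maxLen start (pvStreak s L) =
      (if (pvBestUp s L).1 ≥ maxLen ∧ L ≠ 0 then pvBestUp s L else (maxLen, start)) := by
  intro L
  induction L with
  | zero =>
    intro maxLen start _
    rw [pvBLoop, dif_neg (by omega), if_neg (by simp)]
  | succ L ih =>
    intro maxLen start hlen
    have hcast : ((L + 1 : Nat) : Int) - 1 = (L : Int) := by push_cast; ring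
    rw [pvBLoop, hcast, dif_pos (by positivity)]
    have htn : (L : Int).toNat = L := by omega
    simp only [htn]
    have hrun : (if s.getD L 0 + s.getD (L + 1) 0 > s.getD (L + 2) 0 then pvStreak s (L + 1) + 1 else 0)
        = pvStreak s L := by
      conv_rhs => rw [pvStreak]
      by_cases hg : pvGoodB s L = true
      · rw [if_pos (by simpa [pvGoodB] using hg), dif_pos ⟨by omega, hg⟩]
      · rw [if_neg (by simpa [pvGoodB] using hg), dif_neg (by intro ⟨_, h⟩; exact hg h)]
    simp only [hrun]
    rcases hM : pvBestUp s L with ⟨m1, m2⟩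
    have hbu : pvBestUp s (L + 1) = if pvStreak s L + 2 > m1 then (pvStreak s L + 2, L) else (m1, m2) := by
      rw [pvBestUp, hM]
    have h0 : L = 0 → m1 = 0 ∧ m2 = 0 := by
      intro h; subst h; simp [pvBestUp] at hM; omega
    rw [hbu]
    by_cases hge : pvStreak s L + 2 ≥ maxLen
    · rw [if_pos hge, ih _ _ (by omega), hM]
      by_cases hL0 : L = 0
      · obtain ⟨e1, e2⟩ := h0 hL0
        subst e1 e2 hL0
        split_ifs <;> simp_all
      · split_ifs <;> simp_all <;> omega
    · rw [if_neg hge, ih _ _ (by omega), hM]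
      by_cases hL0 : L = 0
      · obtain ⟨e1, e2⟩ := h0 hL0
        subst e1 e2 hL0
        split_ifs <;> simp_all
      · split_ifs <;> simp_all <;> omega

theorem pv_main_eq (s : List Int) :
    find_longest_triangle_interval s = find_longest_triangle_interval_alt s := by
  rw [find_longest_triangle_interval, find_longest_triangle_interval_alt]
  have hA : pvOuter s s.length 0 0 0 = pvBestUp s (s.length - 2) := by
    have h := pvOuter_eq s (s.length - 2) 0 rfl (by omega)
    simpa [pvBestUp] using h
  by_cases h2 : 2 ≤ s.length
  · have hcast : ((s.length : Int)) - 3 = (((s.length - 2 : Nat)) : Int) - 1 := by omega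
    have hstreak : pvStreak s (s.length - 2) = 0 := by
      rw [pvStreak, dif_neg (by omega)]
    have hB := pvBLoop_eq' s (s.length - 2) 0 0 (by omega)
    rw [hstreak] at hB
    rw [hA, hcast, hB]
    by_cases hL0 : s.length - 2 = 0
    · rw [if_neg (by tauto), hL0]
      simp [pvBestUp]
    · rw [if_pos ⟨by omega, hL0⟩]
  · have hn : s.length - 2 = 0 := by omega
    rw [hA, hn]
    rw [pvBLoop, dif_neg (by omega)]
    simp [pvBestUp]

-- ===== VERDICT (by name: the statement is the Claim_ definition above) =====
theorem find_longest_triangle_interval_spec : Claim_equal_find_longest_triangle_interval := by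
  intro s _
  exact pv_main_eq s
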